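-- pv_equiv track=rewrite | github.com/reversoid/learn-telegram-bot | book_bot/services/file.service.py | find_last_punctuation_interval
-- ===== SOURCE A (Python) =====
-- PUNCTUATION = [',', '.', '!', ':', ';', '?']
--
-- def find_last_punctuation_interval(text: str) -> tuple[int, int]:
--     index_from: int = None
--     index_to: int = None
--
--     i = len(text) - 1
--     while i > 0:
--         letter = text[i]
--         if letter in PUNCTUATION:
--             if (index_to == None):
--                 index_to = i
--             index_from = i
--         elif index_to != None:
--             break
--
--         i -= 1
--
--     return index_from, index_to
-- ===== SOURCE B (Python) =====
-- PUNCTUATION = [',', '.', '!', ':', ';', '?']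
--
-- def find_last_punctuation_interval(text: str) -> tuple[int, int]:
--     # Forward pass over indices 1..len-1: collect every maximal punctuation run
--     # as (start, end) pairs; the answer is the last run, or (None, None).
--     runs = []
--     for i in range(1, len(text)):
--         if text[i] in PUNCTUATION:
--             if runs and runs[-1][1] == i - 1:
--                 runs[-1] = (runs[-1][0], i)
--             else:
--                 runs.append((i, i))
--     if not runs:
--         return None, None
--     return runs[-1]
-- ===== Notes on version B (the rewrite author's own statement) =====
-- stated objective: alternative
-- what changed: Replaced A's backward flag-driven scan (break on first non-punctuation after a hit) with a forward pass that collects the list of all maximal punctuation runs over indices 1..len-1 and returns the last collected run.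
import Mathlib
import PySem

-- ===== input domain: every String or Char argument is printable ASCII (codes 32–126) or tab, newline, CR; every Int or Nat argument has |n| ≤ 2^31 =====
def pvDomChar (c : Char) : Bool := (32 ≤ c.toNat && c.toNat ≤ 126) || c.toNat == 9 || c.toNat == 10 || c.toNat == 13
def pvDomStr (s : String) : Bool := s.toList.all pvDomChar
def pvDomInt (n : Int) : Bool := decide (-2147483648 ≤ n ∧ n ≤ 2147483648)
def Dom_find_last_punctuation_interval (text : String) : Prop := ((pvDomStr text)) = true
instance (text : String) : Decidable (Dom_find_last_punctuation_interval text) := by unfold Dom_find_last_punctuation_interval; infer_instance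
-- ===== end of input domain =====

-- B replaces A's backward flag-driven scan with a forward pass that collects the list of ALL
-- maximal punctuation runs over indices 1..len-1 and returns the last one; objective: alternative
-- (same O(n) time, different traversal direction and data structure). Equal on every input.

def pvPUNCTUATION : List Char := [',', '.', '!', ':', ';', '?']

-- ===== PORT A =====
-- A's while-loop: i counts down from len-1 while i > 0; state (index_from, index_to).
-- text[i] is always in range when read (0 < i ≤ len-1), so getD is exact here.
def pvGoA (cs : List Char) : Nat → Option Int → Option Int → Option Int × Option Int
  | 0, f, t => (f, t)
  | i+1, f, t =>
      let letter := cs.getD (i+1) ' '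
      if letter ∈ pvPUNCTUATION then
        pvGoA cs i (some ((i+1 : Nat) : Int)) (if t = none then some ((i+1 : Nat) : Int) else t)
      else if t ≠ none then (f, t)
      else pvGoA cs i f t

def find_last_punctuation_interval (text : String) : Option Int × Option Int :=
  pvGoA text.toList (text.toList.length - 1) none none

-- ===== PORT B =====
-- One forward step of B's loop body: extend the last run if adjacent, else open a new run.
def pvStepB (cs : List Char) (runs : List (Nat × Nat)) (i : Nat) : List (Nat × Nat) :=
  if cs.getD i ' ' ∈ pvPUNCTUATION then
    match runs.getLast? with
    | some (f, t) => if t = i - 1 then runs.dropLast ++ [(f, i)] else runs ++ [(i, i)]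
    | none => runs ++ [(i, i)]
  else runs

def find_last_punctuation_interval_alt (text : String) : Option Int × Option Int :=
  match ((List.range' 1 (text.toList.length - 1)).foldl (pvStepB text.toList) []).getLast? with
  | none => (none, none)
  | some (f, t) => (some ((f : Nat) : Int), some ((t : Nat) : Int))

-- ===== PRECONDITION & SPEC =====
def Spec_find_last_punctuation_interval (text : String) (out : Option Int × Option Int) : Prop := out = find_last_punctuation_interval_alt text
instance (text : String) (out : Option Int × Option Int) : Decidable (Spec_find_last_punctuation_interval text out) := by unfold Spec_find_last_punctuation_interval; infer_instance

-- ===== CLAIM (what is proved, stated in full; the proofs are below) =====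
def Claim_equal_find_last_punctuation_interval : Prop := ∀ (text : String), Dom_find_last_punctuation_interval text → Spec_find_last_punctuation_interval text (find_last_punctuation_interval text)

-- ===== LEMMAS AND PROOFS =====

-- Common characterization used to meet in the middle: the end of the last run and its start.
def pvFindEnd (cs : List Char) : Nat → Option Nat
  | 0 => none
  | i+1 => if cs.getD (i+1) ' ' ∈ pvPUNCTUATION then some (i+1) else pvFindEnd cs i

def pvExtendStart (cs : List Char) : Nat → Nat → Nat
  | 0, f => f
  | i+1, f => if cs.getD (i+1) ' ' ∈ pvPUNCTUATION then pvExtendStart cs i (i+1) else f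

theorem pvFindEnd_le (cs : List Char) : ∀ i j, pvFindEnd cs i = some j → j ≤ i := by
  intro i
  induction i with
  | zero => intro j h; simp [pvFindEnd] at h
  | succ i ih =>
      intro j h
      by_cases hc : cs[i+1]?.getD ' ' ∈ pvPUNCTUATION
      · simp [pvFindEnd, hc] at h; omega
      · simp [pvFindEnd, hc] at h; have := ih j h; omega

-- A-side: once index_to is set (to some j), A's loop only keeps lowering index_from through
-- the punctuation run and breaks at the first non-punctuation char.
theorem pvGoA_extend (cs : List Char) (j : Int) :
    ∀ (i : Nat) (f : Nat), pvGoA cs i (some (f : Int)) (some j)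
      = (some ((pvExtendStart cs i f : Nat) : Int), some j) := by
  intro i
  induction i with
  | zero => intro f; simp [pvGoA, pvExtendStart]
  | succ i ih =>
      intro f
      by_cases h : cs[i+1]?.getD ' ' ∈ pvPUNCTUATION
      · have hih := ih (i+1)
        push_cast at hih
        simp [pvGoA, pvExtendStart, h, hih]
      · simp [pvGoA, pvExtendStart, h]

-- A-side: before any punctuation is seen A's loop just walks down, and on finding the end j
-- it continues as the extend phase from j-1.
theorem pvGoA_search (cs : List Char) :
    ∀ (i : Nat), pvGoA cs i none none
      = match pvFindEnd cs i with
        | none => (none, none)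
        | some j => (some ((pvExtendStart cs (j - 1) j : Nat) : Int), some ((j : Nat) : Int)) := by
  intro i
  induction i with
  | zero => simp [pvGoA, pvFindEnd]
  | succ i ih =>
      by_cases h : cs[i+1]?.getD ' ' ∈ pvPUNCTUATION
      · have he := pvGoA_extend cs ((i:Int)+1) i (i+1)
        push_cast at he
        simp [pvGoA, pvFindEnd, h, he]
      · simp [pvGoA, pvFindEnd, h, ih]

-- B-side invariant: after B's forward fold over indices 1..m, the LAST collected run is
-- exactly (pvExtendStart (j-1) j, j) where j = pvFindEnd m, or absent if there is none.
theorem pvFoldB_getLast (cs : List Char) :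
    ∀ (m : Nat), ((List.range' 1 m).foldl (pvStepB cs) []).getLast?
      = match pvFindEnd cs m with
        | none => none
        | some j => some (pvExtendStart cs (j - 1) j, j) := by
  intro m
  induction m with
  | zero => simp [pvFindEnd]
  | succ k ih =>
      have hr : List.range' 1 (k+1) = List.range' 1 k ++ [k + 1] := by
        have := List.range'_concat (s := 1) (n := k) (step := 1)
        simpa [Nat.add_comm] using this
      rw [hr, List.foldl_append]
      simp only [List.foldl_cons, List.foldl_nil]
      by_cases hc : cs[k+1]?.getD ' ' ∈ pvPUNCTUATION
      · -- step sees punctuation at k+1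
        rcases hE : pvFindEnd cs k with _ | j
        · -- no run yet: append a new run (k+1, k+1); c(k) is not punctuation (or k = 0)
          have hx : pvExtendStart cs k (k+1) = k + 1 := by
            cases k with
            | zero => simp [pvExtendStart]
            | succ i =>
                have hnp : ¬ cs[i+1]?.getD ' ' ∈ pvPUNCTUATION := by
                  intro hp; simp [pvFindEnd, hp] at hE
                simp [pvExtendStart, hnp]
          simp [pvStepB, pvFindEnd, hc, ih, hE, hx]
        · by_cases hjk : j = k
          · -- adjacent: the last run is extended to end at k+1; c(k) is punctuation
            subst hjk
            rcases j with _ | i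
            · exfalso; simp [pvFindEnd] at hE
            · have hcp : cs[i+1]?.getD ' ' ∈ pvPUNCTUATION := by
                by_contra hnp
                simp [pvFindEnd, hnp] at hE
                have := pvFindEnd_le cs i (i+1) hE
                omega
              have hx : pvExtendStart cs (i+1) (i+2) = pvExtendStart cs i (i+1) := by
                simp [pvExtendStart, hcp]
              simp [pvStepB, pvFindEnd, hc, hcp, ih, hx]
          · -- not adjacent: j < k, so c(k) is not punctuation; append new run (k+1, k+1)
            have hjlt : j < k := lt_of_le_of_ne (pvFindEnd_le cs k j hE) hjk
            have hx : pvExtendStart cs k (k+1) = k + 1 := by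
              cases k with
              | zero => simp [pvFindEnd] at hE
              | succ i =>
                  have hnp : ¬ cs[i+1]?.getD ' ' ∈ pvPUNCTUATION := by
                    intro hp; simp [pvFindEnd, hp] at hE; omega
                  simp [pvExtendStart, hnp]
            simp [pvStepB, pvFindEnd, hc, ih, hE, hjk, hx]
      · -- no punctuation at k+1: runs and pvFindEnd both unchanged
        simp [pvStepB, pvFindEnd, hc, ih]

-- ===== VERDICT (by name: the statement is the Claim_ definition above) =====
theorem find_last_punctuation_interval_spec : Claim_equal_find_last_punctuation_interval := by
  intro text _
  unfold Spec_find_last_punctuation_interval find_last_punctuation_interval find_last_punctuation_interval_alt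
  rw [pvGoA_search, pvFoldB_getLast]
  rcases pvFindEnd text.toList (text.toList.length - 1) with _ | j <;> simp
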